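-- pv_equiv track=rewrite | github.com/mnvsk97/voice-audition | enrichment/sync.py | _azure_style_tags
-- ===== SOURCE A (Python) =====
-- def _azure_style_tags(styles: list[str] | None) -> list[str]:
--     if not styles:
--         return []
--     mapped = set()
--     for style in styles:
--         s = (style or "").strip().lower()
--         if s in {"assistant", "chat", "customerservice", "friendly"}:
--             mapped.add("conversational")
--         elif s in {"newscast", "serious"}:
--             mapped.add("formal")
--         elif s in {"cheerful", "excited", "hopeful"}:
--             mapped.add("upbeat")
--         elif s in {"angry", "terrified", "unfriendly", "disgruntled", "sad", "depressed"}: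
--             mapped.add("dramatic")
--         elif s in {"whispering", "calm"}:
--             mapped.add("soothing")
--         elif s in {"narration-relaxed"}:
--             mapped.add("relaxed")
--         elif s in {"narration-professional"}:
--             mapped.add("articulate")
--     return sorted(mapped)
-- ===== SOURCE B (Python) =====
-- # Inverted lookup: build the set of normalized style strings once, then walk the
-- # fixed tag -> source-styles table (kept in alphabetical tag order) and keep the
-- # tags whose source set intersects the normalized input set.
-- _TAG_SOURCES = [
--     ("articulate", {"narration-professional"}),
--     ("conversational", {"assistant", "chat", "customerservice", "friendly"}),
--     ("dramatic", {"angry", "terrified", "unfriendly", "disgruntled", "sad", "depressed"}),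
--     ("formal", {"newscast", "serious"}),
--     ("relaxed", {"narration-relaxed"}),
--     ("soothing", {"whispering", "calm"}),
--     ("upbeat", {"cheerful", "excited", "hopeful"}),
-- ]
--
--
-- def _azure_style_tags(styles: list[str] | None) -> list[str]:
--     normalized = {(s or "").strip().lower() for s in (styles or [])}
--     return [tag for tag, sources in _TAG_SOURCES if sources & normalized]
-- ===== Notes on version B (the rewrite author's own statement) =====
-- stated objective: alternative
-- what changed: Inverts the traversal: instead of classifying each input style through a 7-way elif chain into a set and sorting it, B builds the set of normalized input styles once and scans a fixed alphabetical tag->sources table, emitting each tag whose source set intersects the input set (no final sort needed).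
import Mathlib
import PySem

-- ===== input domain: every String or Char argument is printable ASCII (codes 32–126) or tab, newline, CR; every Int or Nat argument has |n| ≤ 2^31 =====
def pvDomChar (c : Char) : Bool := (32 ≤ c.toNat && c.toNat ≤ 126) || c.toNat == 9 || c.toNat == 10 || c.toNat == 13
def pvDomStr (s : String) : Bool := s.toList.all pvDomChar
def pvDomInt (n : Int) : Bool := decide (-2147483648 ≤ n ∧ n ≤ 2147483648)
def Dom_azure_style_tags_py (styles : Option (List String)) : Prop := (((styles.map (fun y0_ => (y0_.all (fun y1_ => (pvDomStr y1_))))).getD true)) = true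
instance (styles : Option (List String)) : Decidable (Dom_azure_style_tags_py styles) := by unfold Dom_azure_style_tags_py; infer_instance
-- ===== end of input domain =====

-- B changes the decomposition: instead of classifying each style through an elif chain
-- and sorting the collected tags, it intersects the normalized-input set with each entry
-- of a fixed alphabetical tag->sources table ('alternative'; same return value).

-- ===== PORT A =====
-- (style or "").strip().lower()
def pvNorm (style : String) : String :=
  PySem.Str.lower (PySem.Str.strip (if style = "" then "" else style))

-- the body of A's for-loop (the elif chain), as a named helper
def pvStepA (mapped : PySem.Set String) (style : String) : PySem.Set String :=
  let s := pvNorm style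
  if s ∈ (["assistant", "chat", "customerservice", "friendly"] : List String) then
    PySem.Set.add mapped "conversational"
  else if s ∈ (["newscast", "serious"] : List String) then
    PySem.Set.add mapped "formal"
  else if s ∈ (["cheerful", "excited", "hopeful"] : List String) then
    PySem.Set.add mapped "upbeat"
  else if s ∈ (["angry", "terrified", "unfriendly", "disgruntled", "sad", "depressed"] : List String) then
    PySem.Set.add mapped "dramatic"
  else if s ∈ (["whispering", "calm"] : List String) then
    PySem.Set.add mapped "soothing"
  else if s ∈ (["narration-relaxed"] : List String) then
    PySem.Set.add mapped "relaxed"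
  else if s ∈ (["narration-professional"] : List String) then
    PySem.Set.add mapped "articulate"
  else mapped

def azure_style_tags_py (styles : Option (List String)) : List String :=
  match styles with
  | none => []
  | some l =>
    if l = [] then []
    else PySem.List.sorted (l.foldl pvStepA PySem.Set.empty) (fun x => x) false

-- ===== PORT B =====
def pvTagSources : List (String × PySem.Set String) :=
  [ ("articulate", ["narration-professional"]),
    ("conversational", ["assistant", "chat", "customerservice", "friendly"]),
    ("dramatic", ["angry", "terrified", "unfriendly", "disgruntled", "sad", "depressed"]),
    ("formal", ["newscast", "serious"]),
    ("relaxed", ["narration-relaxed"]),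
    ("soothing", ["whispering", "calm"]),
    ("upbeat", ["cheerful", "excited", "hopeful"]) ]

def azure_style_tags_py_alt (styles : Option (List String)) : List String :=
  let normalized : PySem.Set String := PySem.Set.ofList ((styles.getD []).map pvNorm)
  pvTagSources.filterMap (fun p =>
    if PySem.Set.inter p.2 normalized ≠ [] then some p.1 else none)

-- ===== PRECONDITION & SPEC =====
def Spec_azure_style_tags_py (styles : Option (List String)) (out : List String) : Prop := out = azure_style_tags_py_alt styles
instance (styles : Option (List String)) (out : List String) : Decidable (Spec_azure_style_tags_py styles out) := by unfold Spec_azure_style_tags_py; infer_instance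

-- ===== CLAIM (what is proved, stated in full; the proofs are below) =====
def Claim_equal_azure_style_tags_py : Prop := ∀ (styles : Option (List String)), Dom_azure_style_tags_py styles → Spec_azure_style_tags_py styles (azure_style_tags_py styles)

-- ===== LEMMAS AND PROOFS =====

-- proof-side view of A's elif chain
def pvClassify (s : String) : Option String :=
  if s ∈ (["assistant", "chat", "customerservice", "friendly"] : List String) then some "conversational"
  else if s ∈ (["newscast", "serious"] : List String) then some "formal"
  else if s ∈ (["cheerful", "excited", "hopeful"] : List String) then some "upbeat"
  else if s ∈ (["angry", "terrified", "unfriendly", "disgruntled", "sad", "depressed"] : List String) then some "dramatic"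
  else if s ∈ (["whispering", "calm"] : List String) then some "soothing"
  else if s ∈ (["narration-relaxed"] : List String) then some "relaxed"
  else if s ∈ (["narration-professional"] : List String) then some "articulate"
  else none

theorem mem_stepA (acc : PySem.Set String) (style t : String) :
    t ∈ pvStepA acc style ↔ t ∈ acc ∨ pvClassify (pvNorm style) = some t := by
  simp only [pvStepA, pvClassify]
  split_ifs <;> simp [PySem.Set.mem_add, eq_comm]

theorem nodup_stepA (acc : PySem.Set String) (style : String) (h : acc.Nodup) :
    (pvStepA acc style).Nodup := by
  simp only [pvStepA]
  split_ifs <;> first | exact PySem.Set.nodup_add _ _ h | exact h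

theorem mem_foldA (l : List String) (acc : PySem.Set String) (t : String) :
    t ∈ l.foldl pvStepA acc ↔ t ∈ acc ∨ ∃ s ∈ l, pvClassify (pvNorm s) = some t := by
  induction l generalizing acc with
  | nil => simp
  | cons x xs ih =>
    rw [List.foldl_cons, ih]
    rw [mem_stepA]
    simp only [List.mem_cons]
    constructor
    · rintro (⟨h | h⟩ | ⟨s, hs, h⟩)
      · exact Or.inl h
      · exact Or.inr ⟨x, Or.inl rfl, h⟩
      · exact Or.inr ⟨s, Or.inr hs, h⟩
    · rintro (h | ⟨s, hs | hs, h⟩)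
      · exact Or.inl (Or.inl h)
      · exact Or.inl (Or.inr (hs ▸ h))
      · exact Or.inr ⟨s, hs, h⟩

theorem nodup_foldA (l : List String) (acc : PySem.Set String) (h : acc.Nodup) :
    (l.foldl pvStepA acc).Nodup := by
  induction l generalizing acc with
  | nil => exact h
  | cons x xs ih =>
    rw [List.foldl_cons]
    exact ih _ (nodup_stepA _ _ h)

-- the chain hits tag t exactly when pvNorm s is one of t's source styles
theorem classify_iff (n t : String) :
    pvClassify n = some t ↔ ∃ p ∈ pvTagSources, t = p.1 ∧ n ∈ p.2 := by
  unfold pvClassify pvTagSources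
  split_ifs with h1 h2 h3 h4 h5 h6 h7 <;>
    simp only [List.mem_cons, List.not_mem_nil, or_false] at *
  · rcases h1 with rfl | rfl | rfl | rfl <;> simp [eq_comm]
  · rcases h2 with rfl | rfl <;> simp [eq_comm]
  · rcases h3 with rfl | rfl | rfl <;> simp [eq_comm]
  · rcases h4 with rfl | rfl | rfl | rfl | rfl | rfl <;> simp [eq_comm]
  · rcases h5 with rfl | rfl <;> simp [eq_comm]
  · subst h6; simp [eq_comm]
  · subst h7; simp [eq_comm]
  · constructor
    · intro h; cases h
    · rintro ⟨p, rfl | rfl | rfl | rfl | rfl | rfl | rfl, rfl, hn⟩ <;> simp_all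

theorem alt_eq (styles : Option (List String)) :
    azure_style_tags_py_alt styles = pvTagSources.filterMap (fun p =>
      if PySem.Set.inter p.2 (PySem.Set.ofList ((styles.getD []).map pvNorm)) ≠ []
      then some p.1 else none) := rfl

theorem filterMap_guard_sublist {α β : Type} (g : α → β) (c : α → Prop) [DecidablePred c]
    (L : List α) :
    (L.filterMap (fun p => if c p then some (g p) else none)).Sublist (L.map g) := by
  induction L with
  | nil => simp
  | cons x xs ih =>
    by_cases h : c x
    · simp only [List.filterMap_cons, if_pos h, List.map_cons]
      exact ih.cons₂ _
    · simp only [List.filterMap_cons, if_neg h, List.map_cons]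
      exact ih.cons _

theorem mem_alt (styles : Option (List String)) (t : String) :
    t ∈ azure_style_tags_py_alt styles ↔
      ∃ s ∈ styles.getD [], pvClassify (pvNorm s) = some t := by
  unfold azure_style_tags_py_alt
  simp only [List.mem_filterMap, Option.ite_none_right_eq_some, Option.some.injEq]
  constructor
  · rintro ⟨p, hp, hne, rfl⟩
    rcases List.exists_mem_of_ne_nil _ hne with ⟨x, hx⟩
    rw [PySem.Set.mem_inter] at hx
    rcases hx with ⟨hx1, hx2⟩
    rw [PySem.Set.mem_ofList, List.mem_map] at hx2
    rcases hx2 with ⟨s, hs, rfl⟩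
    exact ⟨s, hs, (classify_iff _ _).2 ⟨p, hp, rfl, hx1⟩⟩
  · rintro ⟨s, hs, hc⟩
    rcases (classify_iff _ _).1 hc with ⟨p, hp, rfl, hn⟩
    refine ⟨p, hp, ?_, rfl⟩
    intro hnil
    have : pvNorm s ∈ PySem.Set.inter p.2 (PySem.Set.ofList ((styles.getD []).map pvNorm)) := by
      rw [PySem.Set.mem_inter, PySem.Set.mem_ofList, List.mem_map]
      exact ⟨hn, s, hs, rfl⟩
    simp [hnil] at this

theorem nodup_alt (styles : Option (List String)) : (azure_style_tags_py_alt styles).Nodup := by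
  rw [alt_eq]
  refine List.Nodup.sublist (filterMap_guard_sublist Prod.fst
    (fun p => PySem.Set.inter p.2 (PySem.Set.ofList ((styles.getD []).map pvNorm)) ≠ []) pvTagSources) ?_
  decide

theorem pairwise_alt (styles : Option (List String)) :
    (azure_style_tags_py_alt styles).Pairwise (fun a b => a < b) := by
  rw [alt_eq]
  refine List.Pairwise.sublist (filterMap_guard_sublist Prod.fst
    (fun p => PySem.Set.inter p.2 (PySem.Set.ofList ((styles.getD []).map pvNorm)) ≠ []) pvTagSources) ?_
  simp [pvTagSources]
  decide

-- ===== VERDICT (by name: the statement is the Claim_ definition above) =====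
theorem azure_style_tags_py_spec : Claim_equal_azure_style_tags_py := by
  intro styles _
  unfold Spec_azure_style_tags_py azure_style_tags_py
  match styles with
  | none => decide
  | some l =>
    by_cases hl : l = []
    · subst hl; decide
    · simp only [hl, if_false]
      apply PySem.List.sorted_eq_of_perm_of_pairwise_lt
      · refine (List.perm_ext_iff_of_nodup (nodup_alt (some l)) (nodup_foldA l _ (by decide))).2 ?_
        intro t
        rw [mem_alt, mem_foldA]
        simp
      · exact pairwise_alt (some l)
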